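-- pv_equiv track=rewrite | github.com/ethan-ho4/whats_poppin | server/news_retrieve.py | parse_v2_themes
-- ===== SOURCE A (Python) =====
-- def parse_v2_themes(themes_str):
--     """
--     Parse V2Themes field to extract theme names with frequency counts.
--     Input: "TAX_FNCACT;WB_632_EDUCATION;TAX_FNCACT;CRISISLEX_CRISIS"
--     Output: ["TAX_FNCACT (2x)", "WB_632_EDUCATION", "CRISISLEX_CRISIS"]
--     """
--     if not themes_str or themes_str.strip() == '':
--         return []
--
--     from collections import Counter
--
--     themes = []
--     for theme_block in themes_str.split(';'):
--         if theme_block: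
--             # Some themes have comma-separated offsets, we only want the theme name
--             theme_name = theme_block.split(',')[0]
--             themes.append(theme_name)
--
--     # Count occurrences and format with frequency
--     theme_counts = Counter(themes)
--     result = []
--     for theme, count in theme_counts.items():
--         if count > 1:
--             result.append(f"{theme}:{count}")
--         else:
--             result.append(theme)
--
--     return result
-- ===== SOURCE B (Python) =====
-- def parse_v2_themes(themes_str):
--     if not themes_str or themes_str.strip() == '':
--         return []
--     themes = [block.split(',')[0] for block in themes_str.split(';') if block]
--     # sort, run-length-encode the runs, then restore first-occurrence order
--     pairs = []
--     for t in sorted(themes):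
--         if pairs and pairs[-1][0] == t:
--             pairs[-1][1] += 1
--         else:
--             pairs.append([t, 1])
--     pairs.sort(key=lambda p: themes.index(p[0]))
--     return [f"{t}:{c}" if c > 1 else t for t, c in pairs]
-- ===== Notes on version B (the rewrite author's own statement) =====
-- stated objective: alternative
-- what changed: B replaces the Counter frequency table by sort-then-scan: it sorts the parsed theme names, run-length-encodes the sorted list into (theme, count) pairs, and re-sorts the pairs by each theme's first-occurrence index to restore A's insertion order.
import Mathlib
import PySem

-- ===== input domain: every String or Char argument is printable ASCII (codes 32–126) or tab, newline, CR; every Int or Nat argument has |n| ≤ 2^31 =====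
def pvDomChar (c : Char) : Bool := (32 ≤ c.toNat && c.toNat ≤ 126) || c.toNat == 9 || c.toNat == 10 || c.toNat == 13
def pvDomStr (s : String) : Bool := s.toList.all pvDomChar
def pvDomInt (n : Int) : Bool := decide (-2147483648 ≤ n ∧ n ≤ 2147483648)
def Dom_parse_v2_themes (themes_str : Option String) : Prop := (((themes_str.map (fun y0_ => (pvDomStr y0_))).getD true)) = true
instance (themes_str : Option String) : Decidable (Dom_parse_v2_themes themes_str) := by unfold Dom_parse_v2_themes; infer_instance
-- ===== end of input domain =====

-- B replaces A's Counter frequency table by sort / run-length-encode / reorder by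
-- first-occurrence index; objective: alternative (not faster).

-- ===== PORT A =====
-- s.split(';') / s.split(',') have a literal non-empty separator, so split? is always `some`.
def parse_v2_themes (themes_str : Option String) : List String :=
  match themes_str with
  | none => []
  | some s =>
    if s = "" ∨ PySem.Str.strip s = "" then []
    else
      let themes := ((PySem.Str.split? s ";").getD []).foldl
        (fun acc b => if b ≠ "" then acc ++ [((PySem.Str.split? b ",").getD []).headD ""] else acc) []
      let theme_counts := PySem.Dict.counter themes
      theme_counts.items.foldl
        (fun res p => if p.2 > 1 then res ++ [p.1 ++ ":" ++ PySem.Int.toStr p.2] else res ++ [p.1]) []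

-- ===== PORT B =====
-- themes.index(p[0]) never raises here (p[0] ∈ themes), so index? is always `some`.
def parse_v2_themes_alt (themes_str : Option String) : List String :=
  match themes_str with
  | none => []
  | some s =>
    if s = "" ∨ PySem.Str.strip s = "" then []
    else
      let themes := (((PySem.Str.split? s ";").getD []).filter (fun b => b ≠ "")).map
        (fun b => ((PySem.Str.split? b ",").getD []).headD "")
      let pairs := (PySem.List.sorted themes (fun t => t) false).foldl
        (fun (ps : List (String × Int)) t =>
          match ps.getLast? with
          | some q => if q.1 = t then ps.dropLast ++ [(q.1, q.2 + 1)] else ps ++ [(t, 1)]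
          | none => [(t, 1)]) []
      let ordered := PySem.List.sorted pairs (fun p => (PySem.List.index? themes p.1).getD 0) false
      ordered.map (fun p => if p.2 > 1 then p.1 ++ ":" ++ PySem.Int.toStr p.2 else p.1)

-- ===== PRECONDITION & SPEC =====
def Spec_parse_v2_themes (themes_str : Option String) (out : List String) : Prop := out = parse_v2_themes_alt themes_str
instance (themes_str : Option String) (out : List String) : Decidable (Spec_parse_v2_themes themes_str out) := by unfold Spec_parse_v2_themes; infer_instance

-- ===== CLAIM (what is proved, stated in full; the proofs are below) =====
def Claim_equal_parse_v2_themes : Prop := ∀ (themes_str : Option String), Dom_parse_v2_themes themes_str → Spec_parse_v2_themes themes_str (parse_v2_themes themes_str)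

-- ===== LEMMAS AND PROOFS =====

-- B's scan step (the `pairs[-1][1] += 1 / append` loop body)
def pvStep (ps : List (String × Int)) (t : String) : List (String × Int) :=
  match ps.getLast? with
  | some q => if q.1 = t then ps.dropLast ++ [(q.1, q.2 + 1)] else ps ++ [(t, 1)]
  | none => [(t, 1)]

theorem pv_count_flatMap_replicate (n : String → Nat) :
    ∀ (ds : List String), ds.Nodup → ∀ a,
    (ds.flatMap (fun t => List.replicate (n t) t)).count a = if a ∈ ds then n a else 0 := by
  intro ds
  induction ds with
  | nil => intro _ a; simp
  | cons d ds ih =>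
    intro hnd a
    have ⟨hd, hnd'⟩ := List.nodup_cons.mp hnd
    rw [List.flatMap_cons, List.count_append, ih hnd' a, List.count_replicate]
    by_cases ha : a = d
    · subst ha; simp [hd]
    · simp [ha, Ne.symm ha]

theorem pv_pairwise_flatMap_replicate (n : String → Nat) (ds : List String)
    (h : ds.Pairwise (· < ·)) :
    (ds.flatMap (fun t => List.replicate (n t) t)).Pairwise (· ≤ ·) := by
  induction ds with
  | nil => simp
  | cons d ds ih =>
    have ⟨hlt, h'⟩ := List.pairwise_cons.mp h
    rw [List.flatMap_cons, List.pairwise_append]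
    refine ⟨List.pairwise_replicate.mpr (Or.inr le_rfl), ih h', ?_⟩
    intro a ha b hb
    have ha' := List.eq_of_mem_replicate ha
    obtain ⟨t, ht, hb'⟩ := List.mem_flatMap.mp hb
    have hb'' := List.eq_of_mem_replicate hb'
    subst ha'; subst hb''
    exact le_of_lt (hlt _ ht)

theorem pv_ds_nodup (xs : List String) :
    (PySem.List.sorted (PySem.Set.ofList xs) (fun t => t) false).Nodup :=
  (PySem.List.sorted_perm _ _ _).nodup_iff.mpr (PySem.Set.nodup_ofList _)

theorem pv_mem_ds {xs : List String} {a : String} :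
    a ∈ PySem.List.sorted (PySem.Set.ofList xs) (fun t => t) false ↔ a ∈ xs := by
  rw [PySem.List.mem_sorted]
  exact PySem.Set.mem_ofList _ _

-- sorted(themes) is the distinct themes in increasing order, each repeated its count
theorem pv_sorted_id_runs (xs : List String) :
    PySem.List.sorted xs (fun t => t) false
      = (PySem.List.sorted (PySem.Set.ofList xs) (fun t => t) false).flatMap
          (fun t => List.replicate (xs.count t) t) := by
  apply PySem.List.sorted_id_eq_of_perm_of_pairwise
  · rw [List.perm_iff_count]
    intro a
    rw [pv_count_flatMap_replicate _ _ (pv_ds_nodup xs) a]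
    by_cases ha : a ∈ xs
    · simp [pv_mem_ds.mpr ha]
    · simp [List.count_eq_zero.mpr ha]
  · exact pv_pairwise_flatMap_replicate _ _ (PySem.List.sorted_ofList_pairwise_lt _)

theorem pv_scan_run :
    ∀ (k : Nat) (ps : List (String × Int)) (t : String) (j : Int),
    List.foldl pvStep (ps ++ [(t, j)]) (List.replicate k t) = ps ++ [(t, j + k)] := by
  intro k
  induction k with
  | zero => intro ps t j; simp
  | succ k ih =>
    intro ps t j
    rw [List.replicate_succ, List.foldl_cons]
    have h1 : (ps ++ [(t, j)]).getLast? = some (t, j) := by simp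
    have h2 : (ps ++ [(t, j)]).dropLast = ps := by simp
    rw [show pvStep (ps ++ [(t, j)]) t = ps ++ [(t, j + 1)] by
      simp only [pvStep, h1, h2, if_true]]
    rw [ih ps t (j+1)]
    have : j + 1 + (k : Int) = j + ((k : Nat) + 1 : Nat) := by push_cast; ring
    rw [this]

-- the scan run-length-encodes a concatenation of runs over distinct themes
theorem pv_scan_flatMap (n : String → Nat) :
    ∀ (ds : List String), ds.Nodup → (∀ t ∈ ds, 0 < n t) →
    ∀ (ps : List (String × Int)), (∀ q ∈ ps.getLast?, q.1 ∉ ds) →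
    List.foldl pvStep ps (ds.flatMap (fun t => List.replicate (n t) t))
      = ps ++ ds.map (fun t => (t, (n t : Int))) := by
  intro ds
  induction ds with
  | nil => intro _ _ ps _; simp
  | cons d ds ih =>
    intro hnd hpos ps hlast
    have ⟨hd, hnd'⟩ := List.nodup_cons.mp hnd
    rw [List.flatMap_cons, List.foldl_append]
    have hkd : 0 < n d := hpos d (List.mem_cons_self)
    obtain ⟨m, hm⟩ : ∃ m, n d = m + 1 := ⟨n d - 1, by omega⟩
    have hfirst : pvStep ps d = ps ++ [(d, 1)] := by
      cases hps : ps.getLast? with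
      | none => simp only [pvStep, hps]; simp [List.getLast?_eq_none_iff.mp hps]
      | some q =>
        have : q.1 ≠ d := fun h => (hlast q (by simp [hps])) (h ▸ List.mem_cons_self)
        simp only [pvStep, hps, if_neg this]
    rw [hm, List.replicate_succ, List.foldl_cons, hfirst, pv_scan_run]
    rw [ih hnd' (fun t ht => hpos t (List.mem_cons_of_mem _ ht)) (ps ++ [(d, (1 + (m:Int) : Int))])
      (by intro q hq; simp at hq; subst hq; simpa using hd)]
    have : (1 : Int) + m = ((m + 1 : Nat) : Int) := by push_cast; ring
    simp [this, hm]

theorem pv_idx_lt {x a : String} {xs : List String} (hax : a ∈ xs) (hane : a ≠ x) :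
    (PySem.List.index? (x :: xs) x).getD 0 < (PySem.List.index? (x :: xs) a).getD 0 := by
  rw [PySem.List.index?_cons_self, PySem.List.index?_cons_of_ne _ (Ne.symm hane)]
  obtain ⟨k, hk⟩ := Option.isSome_iff_exists.mp ((PySem.List.index?_isSome_iff _ _).mpr hax)
  simp only [PySem.List.index?_eq_idxOf?] at hk
  simp [hk]

theorem pv_idx_succ {x a : String} {xs : List String} (hax : a ∈ xs) (hane : a ≠ x) :
    (PySem.List.index? (x :: xs) a).getD 0 = (PySem.List.index? xs a).getD 0 + 1 := by
  rw [PySem.List.index?_cons_of_ne _ (Ne.symm hane)]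
  obtain ⟨k, hk⟩ := Option.isSome_iff_exists.mp ((PySem.List.index?_isSome_iff _ _).mpr hax)
  simp only [PySem.List.index?_eq_idxOf?] at hk
  simp [hk]

-- along first-occurrence (set) order, themes.index is strictly increasing
theorem pv_idx_pairwise : ∀ (xs : List String),
    (PySem.Set.ofList xs).Pairwise
      (fun a b => (PySem.List.index? xs a).getD 0 < (PySem.List.index? xs b).getD 0) := by
  intro xs
  induction xs with
  | nil => simp [PySem.Set.ofList_nil]
  | cons x xs ih =>
    rw [PySem.Set.ofList_cons, List.pairwise_cons]
    have hmem : ∀ a ∈ (PySem.Set.ofList xs).discard x, a ∈ xs ∧ a ≠ x := by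
      intro a ha
      have ⟨hamem, hane⟩ := (PySem.Set.mem_discard _ _ _).mp ha
      exact ⟨(PySem.Set.mem_ofList _ _).mp hamem, hane⟩
    constructor
    · intro a ha
      exact pv_idx_lt (hmem a ha).1 (hmem a ha).2
    · have hsub : ((PySem.Set.ofList xs).discard x).Sublist (PySem.Set.ofList xs) := by
        show (List.filter _ _).Sublist _
        exact List.filter_sublist
      refine (ih.sublist hsub).imp_of_mem ?_
      intro a b ha hb hab
      rw [pv_idx_succ (hmem a ha).1 (hmem a ha).2, pv_idx_succ (hmem b hb).1 (hmem b hb).2]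
      omega

-- B's sort/scan/re-sort pipeline yields the (theme, count) pairs in first-occurrence order
theorem pv_ordered_eq (xs : List String) :
    PySem.List.sorted
      ((PySem.List.sorted xs (fun t => t) false).foldl pvStep [])
      (fun p => (PySem.List.index? xs p.1).getD 0) false
    = (PySem.Set.ofList xs).map (fun t => (t, (xs.count t : Int))) := by
  rw [pv_sorted_id_runs, pv_scan_flatMap _ _ (pv_ds_nodup xs)
    (fun t ht => List.count_pos_iff.mpr (pv_mem_ds.mp ht)) []
    (by intro q hq; simp at hq)]
  rw [List.nil_append]
  apply PySem.List.sorted_eq_of_perm_of_pairwise_lt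
  · exact ((PySem.List.sorted_perm _ _ _).symm.map _)
  · exact List.pairwise_map.mpr (pv_idx_pairwise xs)

-- ===== VERDICT (by name: the statement is the Claim_ definition above) =====
theorem parse_v2_themes_spec : Claim_equal_parse_v2_themes := by
  intro themes_str _
  unfold Spec_parse_v2_themes
  match themes_str with
  | none => rfl
  | some s =>
    simp only [parse_v2_themes, parse_v2_themes_alt]
    by_cases hempty : s = "" ∨ PySem.Str.strip s = ""
    · simp [hempty]
    · simp only [if_neg hempty]
      -- A's theme-collecting loop is B's filter+map comprehension
      rw [PySem.List.foldl_append_ite (p := fun b => b ≠ "")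
        (f := fun b => ((PySem.Str.split? b ",").getD []).headD "")]
      simp only [List.nil_append]
      set themes := (((PySem.Str.split? s ";").getD []).filter (fun b => decide (b ≠ ""))).map
        (fun b => ((PySem.Str.split? b ",").getD []).headD "") with hthemes
      -- A's result loop over Counter items, as a map over first occurrences
      have hA : (fun (res : List String) (p : String × Int) =>
            if p.2 > 1 then res ++ [p.1 ++ ":" ++ PySem.Int.toStr p.2] else res ++ [p.1])
          = fun res p => res ++ [if p.2 > 1 then p.1 ++ ":" ++ PySem.Int.toStr p.2 else p.1] := by
        funext res p; split <;> rfl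
      rw [hA, PySem.List.foldl_append_singleton_eq_map, PySem.Dict.items_counter]
      have hB : (fun (ps : List (String × Int)) (t : String) =>
            match ps.getLast? with
            | some q => if q.1 = t then ps.dropLast ++ [(q.1, q.2 + 1)] else ps ++ [(t, 1)]
            | none => [(t, 1)]) = pvStep := by
        funext ps t; rfl
      rw [hB, pv_ordered_eq themes]
      simp [List.map_map]
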